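-- pv_equiv track=rewrite | github.com/lukefadedaway/adventofcode | 2023/Day 14/sol.py | rotateanddrop
-- ===== SOURCE A (Python) =====
-- def rotateanddrop(a, rev = True):
--     s = [''.join(row) for row in zip(*[reversed(row) for row in a])]
--     s = [''.join(row) for row in zip(*[reversed(row) for row in s])]
--     s = [''.join(row) for row in zip(*[reversed(row) for row in s])]
--     for i in range(len(s)):
--         par = s[i].split('#')
--         pars=[]
--         for p in par:
--             pars += [p,'#' if len(p)>0 else '#']
--         news = ''.join(''.join(sorted(p)) for p in pars)
--         s[i] = news[:-1]
--     return s
-- ===== SOURCE B (Python) =====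
-- def flush(counts):
--     return ''.join(chr(c) * counts.get(chr(c), 0) for c in range(128))
--
-- def rotateanddrop(a, rev=True):
--     def rot(g):
--         return [''.join(col) for col in zip(*[reversed(row) for row in g])]
--     s = rot(rot(rot(a)))
--     out = []
--     for row in s:
--         counts = {}
--         pieces = []
--         for ch in row:
--             if ch == '#':
--                 pieces.append(flush(counts))
--                 pieces.append('#')
--                 counts = {}
--             else:
--                 counts[ch] = counts.get(ch, 0) + 1
--         pieces.append(flush(counts))
--         out.append(''.join(pieces))
--     return out
-- ===== Notes on version B (the rewrite author's own statement) =====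
-- stated objective: alternative
-- what changed: Replaces A's split-on-'#' plus per-segment comparison sort with a single left-to-right scan per row that maintains a character counter and, at each '#' and at the row end, emits the pending characters in ascending code order (a counting sort), so no split lists and no sorted() calls are made; the three-rotation preamble is kept.
import Mathlib
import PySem

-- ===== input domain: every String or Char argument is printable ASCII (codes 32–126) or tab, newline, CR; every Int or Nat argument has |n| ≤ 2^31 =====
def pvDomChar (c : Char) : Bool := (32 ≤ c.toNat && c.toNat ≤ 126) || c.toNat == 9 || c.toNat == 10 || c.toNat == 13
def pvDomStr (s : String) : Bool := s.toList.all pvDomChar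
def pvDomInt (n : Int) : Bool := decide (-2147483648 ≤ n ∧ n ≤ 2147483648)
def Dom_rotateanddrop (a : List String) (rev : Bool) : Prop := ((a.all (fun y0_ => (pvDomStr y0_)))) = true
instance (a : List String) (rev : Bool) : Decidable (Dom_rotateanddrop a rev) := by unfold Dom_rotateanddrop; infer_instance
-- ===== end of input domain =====

-- B replaces A's split-on-'#' + per-segment comparison sort by a single scan per row with a
-- character counter flushed (in ascending code order) at each '#' and at the row end; the
-- three-rotation preamble is unchanged. Objective: alternative algorithm (counting sort, no split).

-- ===== PORT A =====
-- shared helper: ''.join(row) for row in zip(*[reversed(row) for row in g]) — Python zip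
-- truncates to the shortest row; ported by hand (exact: columns i < min length, built in order).
def pyRot (g : List (List Char)) : List (List Char) :=
  let rev := g.map List.reverse
  let n := ((rev.map List.length).min?).getD 0
  (List.range n).map (fun i => rev.map (fun r => r.getD i ' '))

-- the body of A's for-loop over rows
def settleA (l : List Char) : List Char :=
  let par := PySem.Chars.splitOn l ['#']
  let pars := par.foldl (fun acc p => acc ++ [p, if 0 < p.length then ['#'] else ['#']]) ([] : List (List Char))
  let news := (pars.map (fun p => PySem.List.sorted p (fun c => c) false)).flatten
  news.dropLast

def rotateanddrop (a : List String) (rev : Bool) : List String :=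
  let s := pyRot (pyRot (pyRot (a.map String.toList)))
  s.map (fun row => String.mk (settleA row))

-- ===== PORT B =====
-- flush(counts): ''.join(chr(c) * counts.get(chr(c), 0) for c in range(128))
def flushB (counts : PySem.Dict Char Int) : List Char :=
  ((PySem.List.pyRange 0 128 1).map
    (fun c => PySem.List.pyRepeat [Char.ofNat c.toNat] (counts.getD (Char.ofNat c.toNat) 0))).flatten

-- the per-row scan of B: counter + pieces accumulator, flushed at '#' and at the end
def settleB : List Char → PySem.Dict Char Int → List (List Char) → List Char
  | [], counts, pieces => (pieces ++ [flushB counts]).flatten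
  | ch :: t, counts, pieces =>
    if ch = '#' then settleB t PySem.Dict.empty (pieces ++ [flushB counts, ['#']])
    else settleB t (counts.modify ch 0 (· + 1)) pieces

def rotateanddrop_alt (a : List String) (rev : Bool) : List String :=
  let s := pyRot (pyRot (pyRot (a.map String.toList)))
  s.map (fun row => String.mk (settleB row PySem.Dict.empty []))

-- ===== PRECONDITION & SPEC =====
def Spec_rotateanddrop (a : List String) (rev : Bool) (out : List String) : Prop := out = rotateanddrop_alt a rev
instance (a : List String) (rev : Bool) (out : List String) : Decidable (Spec_rotateanddrop a rev out) := by unfold Spec_rotateanddrop; infer_instance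

-- ===== CLAIM (what is proved, stated in full; the proofs are below) =====
def Claim_equal_rotateanddrop : Prop := ∀ (a : List String) (rev : Bool), Dom_rotateanddrop a rev → Spec_rotateanddrop a rev (rotateanddrop a rev)

-- ===== LEMMAS AND PROOFS =====

def mySplit : List Char → List (List Char)
  | [] => [[]]
  | c :: t =>
    if c = '#' then [] :: mySplit t
    else match mySplit t with
      | [] => [[c]]
      | q :: qs => (c :: q) :: qs
theorem mySplit_ne_nil (l : List Char) : mySplit l ≠ [] := by
  cases l with
  | nil => simp [mySplit]
  | cons c t =>
    simp only [mySplit]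
    split
    · simp
    · split <;> simp
def prependHead (pre : List Char) : List (List Char) → List (List Char)
  | [] => [pre]
  | p :: ps => (pre ++ p) :: ps

theorem go_spec (fuel : Nat) : ∀ (l cur : List Char) (acc : List (List Char)), l.length < fuel →
    PySem.Chars.splitOn.go ['#'] fuel l cur acc = acc.reverse ++ prependHead cur.reverse (mySplit l) := by
  induction fuel with
  | zero => intro l cur acc h; omega
  | succ n ih =>
    intro l cur acc h
    cases l with
    | nil => simp [PySem.Chars.splitOn.go, mySplit, prependHead]
    | cons c rest =>
      rw [PySem.Chars.splitOn.go]
      by_cases hc : c = '#'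
      · subst hc
        have hpre : List.isPrefixOf ['#'] ('#' :: rest) = true := by simp [List.isPrefixOf]
        simp only [hpre, if_pos, List.length_cons, List.drop_succ_cons, List.length_nil, List.drop_zero]
        rw [ih rest [] ((cur.reverse) :: acc) (by simpa using Nat.lt_of_succ_lt_succ h)]
        simp only [mySplit, List.reverse_cons]
        cases hm : mySplit rest with
        | nil => exact absurd hm (mySplit_ne_nil rest)
        | cons q qs => simp [prependHead]
      · have hpre : List.isPrefixOf ['#'] (c :: rest) = false := by
          simp [List.isPrefixOf]; exact fun hh => hc hh.symm
        simp only [hpre, Bool.false_eq_true, if_neg, not_false_iff]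
        rw [ih rest (c :: cur) acc (by simpa using Nat.lt_of_succ_lt_succ h)]
        simp only [mySplit, hc, if_false, List.reverse_cons]
        cases hm : mySplit rest with
        | nil => exact absurd hm (mySplit_ne_nil rest)
        | cons q qs => simp [prependHead]

theorem splitOn_eq_mySplit (l : List Char) : PySem.Chars.splitOn l ['#'] = mySplit l := by
  rw [PySem.Chars.splitOn, go_spec (l.length + 1) l [] [] (by omega)]
  cases hm : mySplit l with
  | nil => exact absurd hm (mySplit_ne_nil l)
  | cons q qs => simp [prependHead]

def csort (p : List Char) : List Char := PySem.List.sorted p (fun c => c) false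
def AJ : List (List Char) → List Char
  | [] => []
  | p :: ps => csort p ++ (ps.map (fun q => '#' :: csort q)).flatten

theorem csort_hash : csort ['#'] = ['#'] := by decide

theorem dropJ (ps : List (List Char)) : ∀ p, ((List.flatMap (fun p => [p, ['#']]) (p::ps)).map csort).flatten.dropLast = AJ (p::ps) := by
  induction ps with
  | nil =>
    intro p
    simp [AJ, csort_hash]
  | cons q qs ih =>
    intro p
    have hne : ((List.flatMap (fun p => [p, ['#']]) (q::qs)).map csort).flatten ≠ [] := by
      simp only [List.flatMap_cons, List.map_append, List.map_cons, csort_hash]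
      intro hcontra
      simp at hcontra
    have e1 : (List.flatMap (fun p => [p,['#']]) (p::q::qs)).map csort
        = csort p :: ['#'] :: (List.flatMap (fun p => [p,['#']]) (q::qs)).map csort := by
      simp [csort_hash]
    rw [e1, List.flatten_cons, List.flatten_cons]
    calc (csort p ++ (['#'] ++ ((List.flatMap (fun p => [p,['#']]) (q::qs)).map csort).flatten)).dropLast
        = ((csort p ++ ['#']) ++ ((List.flatMap (fun p => [p,['#']]) (q::qs)).map csort).flatten).dropLast := by
          rw [List.append_assoc]
      _ = (csort p ++ ['#']) ++ ((List.flatMap (fun p => [p,['#']]) (q::qs)).map csort).flatten.dropLast :=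
          List.dropLast_append_of_ne_nil hne
      _ = (csort p ++ ['#']) ++ AJ (q::qs) := by rw [ih q]
      _ = AJ (p::q::qs) := by simp [AJ]

theorem settleA_eq (l : List Char) : settleA l = AJ (mySplit l) := by
  unfold settleA
  rw [splitOn_eq_mySplit]
  simp only [ite_self, PySem.List.foldl_append_eq_flatMap, List.nil_append]
  cases hm : mySplit l with
  | nil => exact absurd hm (mySplit_ne_nil l)
  | cons q qs => exact dropJ qs q

def extD (d : PySem.Dict Char Int) (p : List Char) : PySem.Dict Char Int :=
  p.foldl (fun d x => d.modify x 0 (· + 1)) d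
def BJ (d : PySem.Dict Char Int) : List (List Char) → List Char
  | [] => []
  | p :: ps => flushB (extD d p) ++ (ps.map (fun q => '#' :: flushB (extD PySem.Dict.empty q))).flatten

theorem settleB_eq (l : List Char) : ∀ (d : PySem.Dict Char Int) (pieces : List (List Char)),
    settleB l d pieces = pieces.flatten ++ BJ d (mySplit l) := by
  induction l with
  | nil => intro d pieces; simp [settleB, BJ, mySplit, extD]
  | cons c t ih =>
    intro d pieces
    by_cases hc : c = '#'
    · subst hc
      rw [settleB, if_pos rfl, ih]
      simp only [mySplit]
      cases hm : mySplit t with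
      | nil => exact absurd hm (mySplit_ne_nil t)
      | cons q qs => simp [BJ, extD]
    · rw [settleB, if_neg hc, ih]
      simp only [mySplit, hc, if_false]
      cases hm : mySplit t with
      | nil => exact absurd hm (mySplit_ne_nil t)
      | cons q qs => simp [BJ, extD]

-- ===== char lemmas =====
theorem char_toNat_ofNat (a : Nat) (ha : a < 55296) : (Char.ofNat a).toNat = a := by
  have va : Nat.isValidChar a := Or.inl ha
  simp [Char.toNat, Char.ofNat, va, Char.ofNatAux]
theorem char_ofNat_le (a b : Nat) (ha : a < 55296) (hb : b < 55296) (h : a ≤ b) :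
    Char.ofNat a ≤ Char.ofNat b := by
  have va : Nat.isValidChar a := Or.inl ha
  have vb : Nat.isValidChar b := Or.inl hb
  simp [Char.le_def, Char.ofNat, va, vb, Char.ofNatAux, UInt32.le_iff_toNat_le]
  omega

def blocksList (n : Nat) (f : Nat → Nat) : List Char :=
  ((List.range n).map (fun k => List.replicate (f k) (Char.ofNat k))).flatten

theorem blocks_mem (n : Nat) (f : Nat → Nat) : ∀ x ∈ blocksList n f, ∃ k, k < n ∧ x = Char.ofNat k := by
  intro x hx
  simp only [blocksList, List.mem_flatten, List.mem_map] at hx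
  obtain ⟨bl, ⟨k, hk, rfl⟩, hxbl⟩ := hx
  exact ⟨k, by simpa using hk, (List.eq_of_mem_replicate hxbl)⟩

theorem blocks_pairwise (n : Nat) (f : Nat → Nat) (hn : n ≤ 55296) :
    List.Pairwise (· ≤ ·) (blocksList n f) := by
  induction n with
  | zero => simp [blocksList]
  | succ m ih =>
    have hm : m ≤ 55296 := by omega
    unfold blocksList
    rw [List.range_succ, List.map_append, List.flatten_append]
    apply List.pairwise_append.mpr
    refine ⟨ih hm, ?_, ?_⟩
    · simp only [List.map_cons, List.map_nil, List.flatten_cons, List.flatten_nil, List.append_nil]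
      exact List.pairwise_replicate.mpr (Or.inr (le_refl _))
    · intro x hx y hy
      obtain ⟨k, hk, rfl⟩ := blocks_mem m f x hx
      simp only [List.map_cons, List.map_nil, List.flatten_cons, List.flatten_nil, List.append_nil] at hy
      rw [List.eq_of_mem_replicate hy]
      exact char_ofNat_le k m (by omega) (by omega) (by omega)

theorem blocks_count (n : Nat) (f : Nat → Nat) (hn : n ≤ 55296) (x : Char) :
    List.count x (blocksList n f) = if x.toNat < n then f x.toNat else 0 := by
  induction n with
  | zero => simp [blocksList]
  | succ m ih =>
    have hm : m ≤ 55296 := by omega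
    unfold blocksList
    rw [List.range_succ, List.map_append, List.flatten_append, List.count_append]
    have ihm := ih hm
    unfold blocksList at ihm
    rw [ihm]
    simp only [List.map_cons, List.map_nil, List.flatten_cons, List.flatten_nil, List.append_nil,
      List.count_replicate]
    by_cases h1 : x.toNat < m
    · have : ¬ (Char.ofNat m == x) = true := by
        simp only [beq_iff_eq]
        intro he
        have := char_toNat_ofNat m (by omega)
        rw [he] at this
        omega
      simp [h1, this]
      omega
    · by_cases h2 : x.toNat = m
      · have he : (Char.ofNat m == x) = true := by
          simp only [beq_iff_eq]
          rw [← h2, Char.ofNat_toNat]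
        simp [he, h2]
      · have : ¬ (Char.ofNat m == x) = true := by
          simp only [beq_iff_eq]
          intro he
          have := char_toNat_ofNat m (by omega)
          rw [he] at this
          omega
        simp [h1, this]
        intro h3
        omega

theorem extD_empty_eq_counter (p : List Char) : extD PySem.Dict.empty p = PySem.Dict.counter p := by
  rw [PySem.Dict.counter_eq_foldl]; rfl

theorem flushB_counter (p : List Char) :
    flushB (PySem.Dict.counter p) = blocksList 128 (fun k => List.count (Char.ofNat k) p) := by
  unfold flushB blocksList
  have h128 : (((128 : Int)) - 0).toNat = 128 := by decide
  rw [PySem.List.pyRange_one, h128, List.map_map]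
  congr 1
  apply List.map_congr_left
  intro k _
  simp only [Function.comp_apply]
  have h0 : ((0 : Int) + k).toNat = k := by omega
  rw [h0, PySem.List.pyRepeat_singleton, PySem.Dict.getD_counter]
  norm_num

theorem flush_eq_csort (p : List Char) (hp : ∀ c ∈ p, c.toNat < 128) :
    flushB (extD PySem.Dict.empty p) = csort p := by
  rw [extD_empty_eq_counter, flushB_counter]
  unfold csort
  refine (PySem.List.sorted_id_eq_of_perm_of_pairwise p _ ?_ ?_).symm
  · apply List.perm_iff_count.mpr
    intro x
    rw [blocks_count 128 _ (by omega) x]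
    by_cases hx : x.toNat < 128
    · simp only [hx, if_pos, Char.ofNat_toNat]
    · have : x ∉ p := fun hmem => hx (hp x hmem)
      simp [hx, List.count_eq_zero.mpr this]
  · exact blocks_pairwise 128 _ (by omega)

theorem mySplit_subset (l : List Char) : ∀ p ∈ mySplit l, ∀ c ∈ p, c ∈ l := by
  induction l with
  | nil =>
    intro p hp c hc
    simp only [mySplit, List.mem_singleton] at hp
    subst hp
    simp at hc
  | cons a t ih =>
    intro p hp c hc
    by_cases ha : a = '#'
    · subst ha
      have hred : mySplit ('#' :: t) = [] :: mySplit t := by simp [mySplit]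
      rw [hred] at hp
      rcases List.mem_cons.mp hp with rfl | hp
      · simp at hc
      · exact List.mem_cons_of_mem _ (ih p hp c hc)
    · simp only [mySplit, ha, if_false] at hp
      cases hm : mySplit t with
      | nil => exact absurd hm (mySplit_ne_nil t)
      | cons q qs =>
        rw [hm] at hp
        rcases List.mem_cons.mp hp with rfl | hp2
        · rcases List.mem_cons.mp hc with rfl | hc2
          · simp
          · exact List.mem_cons_of_mem _ (ih q (by rw [hm]; simp) c hc2)
        · exact List.mem_cons_of_mem _ (ih p (by rw [hm]; exact List.mem_cons_of_mem _ hp2) c hc)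

theorem settle_row_eq (l : List Char) (hl : ∀ c ∈ l, c.toNat < 128) :
    settleA l = settleB l PySem.Dict.empty [] := by
  rw [settleA_eq, settleB_eq]
  simp only [List.flatten_nil, List.nil_append]
  cases hm : mySplit l with
  | nil => exact absurd hm (mySplit_ne_nil l)
  | cons p ps =>
    have hsub := mySplit_subset l
    rw [hm] at hsub
    simp only [AJ, BJ]
    congr 1
    · exact (flush_eq_csort p (fun c hc => hl c (hsub p (by simp) c hc))).symm
    · congr 1
      apply List.map_congr_left
      intro q hq
      rw [flush_eq_csort q (fun c hc => hl c (hsub q (by simp [hq]) c hc))]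

theorem pyRot_chars (g : List (List Char)) (hg : ∀ r ∈ g, ∀ c ∈ r, c.toNat < 128) :
    ∀ r ∈ pyRot g, ∀ c ∈ r, c.toNat < 128 := by
  intro r hr c hc
  simp only [pyRot, List.mem_map] at hr
  obtain ⟨i, _, rfl⟩ := hr
  simp only [List.mem_map] at hc
  obtain ⟨row, hrow, rfl⟩ := hc
  obtain ⟨r0, hr0, rfl⟩ := hrow
  by_cases h : i < r0.reverse.length
  · rw [List.getD_eq_getElem _ _ h]
    exact hg r0 hr0 _ (List.mem_reverse.mp (List.getElem_mem h))
  · rw [List.getD_eq_default _ _ (by omega)]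
    decide

-- ===== VERDICT (by name: the statement is the Claim_ definition above) =====
theorem rotateanddrop_spec : Claim_equal_rotateanddrop := by
  intro a rev hDom
  unfold Spec_rotateanddrop rotateanddrop rotateanddrop_alt
  have h0 : ∀ r ∈ a.map String.toList, ∀ c ∈ r, c.toNat < 128 := by
    intro r hr c hc
    simp only [List.mem_map] at hr
    obtain ⟨s, hs, rfl⟩ := hr
    have := (List.all_eq_true.mp hDom) s hs
    have := (List.all_eq_true.mp this) c hc
    simp only [pvDomChar, Bool.or_eq_true, Bool.and_eq_true, decide_eq_true_eq, beq_iff_eq] at this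
    omega
  have h3 := pyRot_chars _ (pyRot_chars _ (pyRot_chars _ h0))
  apply List.map_congr_left
  intro row hrow
  rw [settle_row_eq row (h3 row hrow)]
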